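-- pv_equiv track=rewrite | github.com/qxzhou1010/Privacy-Preserving-kNN | vhe.py | ten_to_2
-- ===== SOURCE A (Python) =====
-- l = 60
--
-- def ten_to_2(num):
--     num = int(abs(num))
--     res=[]
--     while True:
--         y = num % 2
--         num = int(num/2)
--         res.append(y)
--         if num == 0:
--             break
--     #下面的代码 来是实现比特化后的数据位数等于 l
--     #但是，如果我len(res) > l  呢？？
--     if len(res) == l:
--         return res
--     else:
--         for i in range(len(res), l):
--             res.append(0)
--         return res
-- ===== SOURCE B (Python) =====
-- l = 60
--
-- def ten_to_2(num):
--     num = int(abs(num))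
--     length = max(num.bit_length(), l)
--     return [(num >> i) & 1 for i in range(length)]
-- ===== Notes on version B (the rewrite author's own statement) =====
-- stated objective: simpler
-- what changed: Replaces A's two-phase approach (while-loop extracting bits with %2 and repeated halving, then a second loop padding with zeros up to l) by precomputing the output length as max(bit_length, l) and emitting all bits in one indexed comprehension with shift-and-mask.
import Mathlib
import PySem

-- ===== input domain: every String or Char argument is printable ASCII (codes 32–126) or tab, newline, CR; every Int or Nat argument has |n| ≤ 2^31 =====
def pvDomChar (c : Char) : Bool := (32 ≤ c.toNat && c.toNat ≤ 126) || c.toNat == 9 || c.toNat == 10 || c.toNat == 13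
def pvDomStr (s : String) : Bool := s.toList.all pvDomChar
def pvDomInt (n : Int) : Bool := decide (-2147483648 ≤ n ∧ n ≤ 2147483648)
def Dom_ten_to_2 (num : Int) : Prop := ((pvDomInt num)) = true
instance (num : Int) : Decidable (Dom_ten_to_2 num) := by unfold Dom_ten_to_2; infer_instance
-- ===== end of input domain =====

-- B replaces A's two loops (bit extraction by repeated halving, then zero-padding to l) by one
-- indexed pass of precomputed length max(bit_length, l); objective: simpler. Equivalence is on the
-- stated domain |num| ≤ 2^31, where A's float halving 'int(num/2)' is exact integer halving.

-- ===== PORT A =====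
-- the while-loop of A: append num % 2, halve, stop when the halved value is 0
def ten2loopA (n : Nat) : List Int :=
  if h : n / 2 = 0 then [((n % 2 : Nat) : Int)]
  else ((n % 2 : Nat) : Int) :: ten2loopA (n / 2)
termination_by n
decreasing_by omega

def ten_to_2 (num : Int) : List Int :=
  -- num = int(abs(num)); on |num| ≤ 2^31 int(num/2) is exact, ported as Nat halving
  if (ten2loopA num.natAbs).length = 60 then ten2loopA num.natAbs
  else (PySem.List.pyRange ((ten2loopA num.natAbs).length : Int) 60 1).foldl
    (fun acc _ => acc ++ [(0 : Int)]) (ten2loopA num.natAbs)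

-- ===== PORT B =====
def ten_to_2_alt (num : Int) : List Int :=
  (List.range (max (PySem.Int.bitLength (num.natAbs : Int)) 60)).map
    (fun i => (((num.natAbs >>> i) &&& 1 : Nat) : Int))

-- ===== PRECONDITION & SPEC =====
def Spec_ten_to_2 (num : Int) (out : List Int) : Prop := out = ten_to_2_alt num
instance (num : Int) (out : List Int) : Decidable (Spec_ten_to_2 num out) := by unfold Spec_ten_to_2; infer_instance

-- ===== CLAIM (what is proved, stated in full; the proofs are below) =====
def Claim_equal_ten_to_2 : Prop := ∀ (num : Int), Dom_ten_to_2 num → Spec_ten_to_2 num (ten_to_2 num)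

-- ===== LEMMAS AND PROOFS =====

-- bit i of n, as both programs compute it after normalisation
lemma bit_zero_of_ge {n i : Nat} (h : PySem.Int.bitLength (n : Int) ≤ i) :
    n / 2 ^ i % 2 = 0 := by
  have h1 : n < 2 ^ i := by
    calc n = (n : Int).natAbs := by simp
    _ < 2 ^ PySem.Int.bitLength (n : Int) := PySem.Int.lt_two_pow_bitLength _
    _ ≤ 2 ^ i := Nat.pow_le_pow_right (by norm_num) h
  simp [Nat.div_eq_of_lt h1]

lemma bitLength_pos {n : Nat} (h : 0 < n) : 0 < PySem.Int.bitLength (n : Int) := by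
  rw [PySem.Int.bitLength_natCast h]; omega

-- A's while-loop produces exactly the first max(bitLength n, 1) bits, LSB first
lemma loopA_eq (n : Nat) :
    ten2loopA n =
      (List.range (max (PySem.Int.bitLength (n : Int)) 1)).map
        (fun i => ((n / 2 ^ i % 2 : Nat) : Int)) := by
  induction n using Nat.strong_induction_on with
  | _ n ih =>
    rw [ten2loopA.eq_def]
    by_cases h : n / 2 = 0
    · simp only [h, dif_pos]
      have hle : n ≤ 1 := by omega
      interval_cases n <;> decide
    · have hn : 0 < n := by omega
      have hbl : PySem.Int.bitLength (n : Int) =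
          PySem.Int.bitLength ((n / 2 : Nat) : Int) + 1 := PySem.Int.bitLength_natCast hn
      have hbl' : 0 < PySem.Int.bitLength ((n / 2 : Nat) : Int) := bitLength_pos (by omega)
      simp only [h, dif_neg, not_false_iff]
      rw [ih (n / 2) (Nat.div_lt_self hn (by norm_num)), hbl]
      have hmax : max (PySem.Int.bitLength ((n / 2 : Nat) : Int) + 1) 1 =
          (max (PySem.Int.bitLength ((n / 2 : Nat) : Int)) 1) + 1 := by omega
      rw [hmax, List.range_succ_eq_map, List.map_cons, List.map_map]
      have hm : max (PySem.Int.bitLength ((n / 2 : Nat) : Int)) 1 =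
          PySem.Int.bitLength ((n / 2 : Nat) : Int) := by omega
      rw [hm]
      simp only [pow_zero, Nat.div_one]
      congr 1
      apply List.map_congr_left
      intro i _
      simp only [Function.comp_apply, Nat.succ_eq_add_one]
      congr 2
      rw [pow_succ, Nat.mul_comm, ← Nat.div_div_eq_div_mul]

-- length of a step-one range of integers
lemma pyRange_one_length (k : Nat) (x : Int) :
    (PySem.List.pyRange x (x + k) 1).length = k := by
  induction k generalizing x with
  | zero => simp [PySem.List.pyRange]
  | succ k ihk =>
    push_cast
    rw [PySem.List.pyRange_one_cons (by omega : x < x + ((k : Int) + 1))]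
    simp only [List.length_cons]
    rw [show x + ((k : Int) + 1) = (x + 1) + (k : Int) by ring, ihk]

theorem ten_to_2_spec : Claim_equal_ten_to_2 := by
  intro num hdom
  unfold Spec_ten_to_2 ten_to_2 ten_to_2_alt
  set n := num.natAbs with hn
  -- bitLength bound from the domain
  have hb : PySem.Int.bitLength (n : Int) ≤ 32 := by
    by_cases h0 : n = 0
    · simp [h0, PySem.Int.bitLength_zero]
    · have h1 := PySem.Int.two_pow_bitLength_le (n : Int) (by exact_mod_cast h0)
      have h2 : n ≤ 2 ^ 31 := by
        have : -2147483648 ≤ num ∧ num ≤ 2147483648 := by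
          simpa [Dom_ten_to_2, pvDomInt] using hdom
        omega
      simp only [Int.natAbs_natCast] at h1
      by_contra hcon
      have : 2 ^ 32 ≤ 2 ^ (PySem.Int.bitLength (n : Int) - 1) :=
        Nat.pow_le_pow_right (by norm_num) (by omega)
      omega
  set a := max (PySem.Int.bitLength (n : Int)) 1 with ha
  have ha60 : a ≤ 60 := by omega
  have hmax60 : max (PySem.Int.bitLength (n : Int)) 60 = 60 := by omega
  rw [hmax60, loopA_eq]
  set f : Nat → Int := fun i => ((n / 2 ^ i % 2 : Nat) : Int) with hf
  have hlen : ((List.range a).map f).length = a := by simp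
  obtain ⟨k, hk⟩ : ∃ k, (60 : Nat) = a + k := ⟨60 - a, by omega⟩
  -- both branches of A equal (range a).map f ++ replicate k zeros
  have hcommon :
      (if ((List.range a).map f).length = 60 then (List.range a).map f
       else (PySem.List.pyRange (((List.range a).map f).length : Int) 60 1).foldl
         (fun acc _ => acc ++ [(0 : Int)]) ((List.range a).map f)) =
      (List.range a).map f ++ List.replicate k 0 := by
    rw [hlen]
    by_cases he : a = 60
    · have hk0 : k = 0 := by omega
      simp [he, hk0]
    · rw [if_neg he]
      rw [PySem.List.foldl_append_singleton_eq_map (fun _ => (0 : Int))]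
      congr 1
      rw [List.map_const']
      congr 1
      rw [show (60 : Int) = (a : Int) + (k : Int) by exact_mod_cast hk]
      exact pyRange_one_length k a
  rw [hcommon, hk, List.range_add, List.map_append, List.map_map]
  congr 1
  · apply List.map_congr_left
    intro i _
    simp [f, Nat.shiftRight_eq_div_pow, Nat.and_one_is_mod]
  · symm
    rw [List.eq_replicate_iff]
    refine ⟨by simp, ?_⟩
    intro b hb'
    simp only [List.mem_map, List.mem_range, Function.comp_apply] at hb'
    obtain ⟨i, _, hbi⟩ := hb'
    rw [← hbi]
    have hz : n >>> (a + i) &&& 1 = 0 := by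
      rw [Nat.shiftRight_eq_div_pow, Nat.and_one_is_mod]
      exact bit_zero_of_ge (by omega)
    simp [hz]
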